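-- pv_equiv track=rewrite | github.com/FrankD412/pyaestro | tests/helpers/utils.py | generate_unique_lower_names
-- ===== SOURCE A (Python) =====
-- import itertools
-- from string import ascii_lowercase, ascii_uppercase
-- from typing import Iterable
--
-- def generate_unique_lower_names(count: int) -> Iterable[str]:
--     number = 0
--     for length in itertools.count(1):
--         for i in itertools.product(ascii_lowercase, repeat=length):
--             number = number + 1
--             if number > count:
--                 return
--             yield "".join(i)
-- ===== SOURCE B (Python) =====
-- def generate_unique_lower_names(count):
--     """Yield the first `count` lowercase names in shortlex order, each computed
--     directly by bijective base-26 conversion of its position instead of itertools.product enumeration."""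
--     n = 0
--     while n < count:
--         n += 1
--         m = n
--         name = ""
--         while m > 0:
--             m -= 1
--             name = chr(ord('a') + m % 26) + name
--             m //= 26
--         yield name
-- ===== Notes on version B (the rewrite author's own statement) =====
-- stated objective: alternative
-- what changed: Replaces the nested itertools.count/itertools.product enumeration with a single counting loop that computes each name directly by bijective base-26 conversion of its position in the sequence.
import Mathlib
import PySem

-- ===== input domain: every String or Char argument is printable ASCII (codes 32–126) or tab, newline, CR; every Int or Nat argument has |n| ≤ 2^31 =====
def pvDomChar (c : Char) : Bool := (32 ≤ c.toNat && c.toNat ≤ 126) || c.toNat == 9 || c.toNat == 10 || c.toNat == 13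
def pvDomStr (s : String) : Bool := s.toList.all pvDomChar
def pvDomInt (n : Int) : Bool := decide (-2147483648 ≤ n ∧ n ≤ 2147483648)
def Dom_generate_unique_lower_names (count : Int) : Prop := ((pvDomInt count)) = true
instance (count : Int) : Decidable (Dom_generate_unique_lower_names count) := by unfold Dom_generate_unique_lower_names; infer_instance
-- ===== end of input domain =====

-- B replaces A's nested length/product enumeration by direct bijective base-26 conversion
-- of each name's index in the sequence (objective: alternative). A is a generator in Python; the list of
-- yielded values is what is ported and proved equal.

-- ===== PORT A =====

-- ascii_lowercase
def pvLetters : List Char :=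
  ['a','b','c','d','e','f','g','h','i','j','k','l','m',
   'n','o','p','q','r','s','t','u','v','w','x','y','z']

-- itertools.product(ascii_lowercase, repeat=length), in product order
def pvAProd : Nat → List (List Char)
  | 0 => [[]]
  | l + 1 => pvLetters.flatMap (fun c => (pvAProd l).map (fun t => c :: t))

-- the inner `for i in itertools.product(...)` loop: returns (number, yielded strings, stopped?)
def pvAInner (count number : Int) (ts : List (List Char)) : Int × List String × Bool :=
  match ts with
  | [] => (number, [], false)
  | t :: rest =>
    if number + 1 > count then (number + 1, [], true)
    else
      let r := pvAInner count (number + 1) rest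
      (r.1, String.mk t :: r.2.1, r.2.2)

-- the outer `for length in itertools.count(1)` loop; fuel only makes the loop total
-- (count.toNat + 1 rounds always suffice to reach `number > count`, as proved below)
def pvAOuter (count number : Int) (length fuel : Nat) : List String :=
  match fuel with
  | 0 => []
  | fuel' + 1 =>
    let r := pvAInner count number (pvAProd length)
    if r.2.2 then r.2.1
    else r.2.1 ++ pvAOuter count r.1 (length + 1) fuel'

def generate_unique_lower_names (count : Int) : List String :=
  pvAOuter count 0 1 (count.toNat + 1)

-- ===== PORT B =====

-- the inner `while m > 0` loop of B: bijective base-26 digits of m, most significant first, prepended to s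
def pvNameOf (m : Nat) (s : List Char) : List Char :=
  if h : m = 0 then s
  else pvNameOf ((m - 1) / 26) (Char.ofNat (97 + (m - 1) % 26) :: s)
termination_by m
decreasing_by
  have := Nat.div_le_self (m - 1) 26
  omega

-- the outer `while n < count` loop of B
def pvAltGo (count : Int) (n : Nat) : List String :=
  if h : (n : Int) < count then
    String.mk (pvNameOf (n + 1) []) :: pvAltGo count (n + 1)
  else []
termination_by (count - n).toNat
decreasing_by omega

def generate_unique_lower_names_alt (count : Int) : List String :=
  pvAltGo count 0

-- ===== PRECONDITION & SPEC =====
def Spec_generate_unique_lower_names (count : Int) (out : List String) : Prop := out = generate_unique_lower_names_alt count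
instance (count : Int) (out : List String) : Decidable (Spec_generate_unique_lower_names count out) := by unfold Spec_generate_unique_lower_names; infer_instance

-- ===== CLAIM (what is proved, stated in full; the proofs are below) =====
def Claim_equal_generate_unique_lower_names : Prop := ∀ (count : Int), Dom_generate_unique_lower_names count → Spec_generate_unique_lower_names count (generate_unique_lower_names count)

-- ===== LEMMAS AND PROOFS =====

-- number of nonempty strings of length ≤ l (off 0 = 0, off 1 = 26, off 2 = 702, …)
def pvOff : Nat → Nat
  | 0 => 0
  | l + 1 => 26 * (pvOff l + 1)

-- fixed-width base-26 digits of i, most significant first, as letters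
def pvDigits : Nat → Nat → List Char
  | 0, _ => []
  | l + 1, i => Char.ofNat (97 + i / 26 ^ l) :: pvDigits l (i % 26 ^ l)

lemma pvOff_pow (l : Nat) : 25 * pvOff l + 26 = 26 ^ (l + 1) := by
  induction l with
  | zero => simp [pvOff]
  | succ l ih =>
    have h : 26 ^ (l + 1 + 1) = 26 ^ (l + 1) * 26 := pow_succ 26 (l + 1)
    simp only [pvOff]
    omega

lemma pvOff_succ (l : Nat) : pvOff (l + 1) = pvOff l + 26 ^ (l + 1) := by
  have h1 := pvOff_pow l
  simp only [pvOff]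
  omega

lemma pvAProd_eq (l : Nat) : pvAProd l = (List.range (26 ^ l)).map (pvDigits l) := by
  induction l with
  | zero => decide
  | succ l ih =>
    have hlet : pvLetters = (List.range 26).map (fun d => Char.ofNat (97 + d)) := by decide
    have hsplit : ∀ (a : Nat) (f : Nat → List Char),
        (List.range (a * 26 ^ l)).map f
          = (List.range a).flatMap (fun d => (List.range (26 ^ l)).map (fun j => f (d * 26 ^ l + j))) := by
      intro a f
      induction a with
      | zero => simp
      | succ a iha =>
        have : (a + 1) * 26 ^ l = a * 26 ^ l + 26 ^ l := by ring
        rw [this, List.range_add, List.map_append, iha, List.range_succ, List.flatMap_append]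
        simp [List.map_map, Function.comp]
    have hpow : 26 ^ (l + 1) = 26 * 26 ^ l := by rw [pow_succ]; ring
    rw [hpow, hsplit 26 (pvDigits (l + 1))]
    show pvLetters.flatMap (fun c => (pvAProd l).map (fun t => c :: t)) = _
    rw [hlet, ih, List.flatMap_map]
    apply List.flatMap_congr
    intro d _
    rw [List.map_map]
    apply List.map_congr_left
    intro j hj
    have hj' : j < 26 ^ l := List.mem_range.mp hj
    have hdiv : (d * 26 ^ l + j) / 26 ^ l = d := by
      rw [Nat.add_comm, Nat.add_mul_div_right _ _ (Nat.pow_pos (by norm_num : (0:Nat) < 26)),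
        Nat.div_eq_of_lt hj', Nat.zero_add]
    have hmod : (d * 26 ^ l + j) % 26 ^ l = j := by
      rw [Nat.add_comm, Nat.add_mul_mod_self_right, Nat.mod_eq_of_lt hj']
    simp [pvDigits, Function.comp, hdiv, hmod]

lemma pvAProd_length (l : Nat) : (pvAProd l).length = 26 ^ l := by
  simp [pvAProd_eq]

lemma pvDigits_peel (l : Nat) : ∀ i, i < 26 ^ (l + 1) →
    pvDigits (l + 1) i = pvDigits l (i / 26) ++ [Char.ofNat (97 + i % 26)] := by
  induction l with
  | zero =>
    intro i hi
    simp [pvDigits, Nat.mod_eq_of_lt (by omega : i < 26)]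
  | succ l ih =>
    intro i hi
    have h26 : (0:Nat) < 26 ^ (l + 1) := Nat.pow_pos (by norm_num : (0:Nat) < 26)
    have hmlt : i % 26 ^ (l + 1) < 26 ^ (l + 1) := Nat.mod_lt _ h26
    have e1 : i / 26 / 26 ^ l = i / 26 ^ (l + 1) := by
      rw [Nat.div_div_eq_div_mul, ← pow_succ']
    have e2 : i % 26 ^ (l + 1) / 26 = i / 26 % 26 ^ l := by
      have := Nat.mod_mul_right_div_self i 26 (26 ^ l)
      rwa [← pow_succ'] at this
    have e3 : i % 26 ^ (l + 1) % 26 = i % 26 := by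
      apply Nat.mod_mod_of_dvd
      exact dvd_pow_self 26 (Nat.succ_ne_zero l)
    calc pvDigits (l + 2) i
        = Char.ofNat (97 + i / 26 ^ (l + 1)) :: pvDigits (l + 1) (i % 26 ^ (l + 1)) := rfl
      _ = Char.ofNat (97 + i / 26 ^ (l + 1)) ::
            (pvDigits l (i % 26 ^ (l + 1) / 26) ++ [Char.ofNat (97 + i % 26 ^ (l + 1) % 26)]) := by
            rw [ih _ hmlt]
      _ = _ := by rw [e2, e3]; simp [pvDigits, e1]

lemma pvNameOf_off (l : Nat) : ∀ i s, i < 26 ^ (l + 1) →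
    pvNameOf (pvOff l + 1 + i) s = pvDigits (l + 1) i ++ s := by
  induction l with
  | zero =>
    intro i s hi
    have hi26 : i < 26 := by simpa using hi
    have hne : ¬ (pvOff 0 + 1 + i = 0) := by simp [pvOff]
    rw [pvNameOf, dif_neg hne]
    have h2 : pvOff 0 + 1 + i - 1 = i := by simp [pvOff]
    rw [h2, Nat.div_eq_of_lt hi26, Nat.mod_eq_of_lt hi26, pvNameOf]
    simp [pvDigits]
  | succ l ih =>
    intro i s hi
    have hq : i / 26 < 26 ^ (l + 1) := by
      apply Nat.div_lt_of_lt_mul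
      rw [← pow_succ']
      exact hi
    have hne : ¬ (pvOff (l + 1) + 1 + i = 0) := by
      simp only [pvOff]; omega
    rw [pvNameOf, dif_neg hne]
    have hm : pvOff (l + 1) + 1 + i - 1 = 26 * (pvOff l + 1) + i := by
      simp only [pvOff]; omega
    have hdiv : (26 * (pvOff l + 1) + i) / 26 = pvOff l + 1 + i / 26 := by
      rw [Nat.mul_add_div (by norm_num)]
    have hmod : (26 * (pvOff l + 1) + i) % 26 = i % 26 := Nat.mul_add_mod 26 _ i
    rw [hm, hdiv, hmod, ih _ _ hq, pvDigits_peel (l + 1) i hi, List.append_assoc]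
    rfl

lemma pvAInner_full (count : Int) : ∀ ts (n : Int), n + ts.length ≤ count →
    pvAInner count n ts = (n + ts.length, ts.map String.mk, false) := by
  intro ts
  induction ts with
  | nil => intro n h; simp [pvAInner]
  | cons t rest ih =>
    intro n h
    have hlen : (List.length (t :: rest) : Int) = rest.length + 1 := by
      simp
    have hle : ¬ (n + 1 > count) := by
      have : (0:Int) ≤ rest.length := by positivity
      omega
    rw [pvAInner, if_neg hle, ih (n + 1) (by omega)]
    simp only [List.length_cons, List.map_cons, Prod.mk.injEq]
    exact ⟨by push_cast; ring, trivial⟩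

lemma pvAInner_stop (count : Int) : ∀ ts (n : Int), ts ≠ [] → count < n + ts.length →
    (pvAInner count n ts).2 = ((ts.take (count - n).toNat).map String.mk, true) := by
  intro ts
  induction ts with
  | nil => intro n h; exact absurd rfl h
  | cons t rest ih =>
    intro n _ hlt
    by_cases hstop : n + 1 > count
    · have : (count - n).toNat = 0 := by omega
      rw [pvAInner, if_pos hstop, this]
      simp
    · have hrest : rest ≠ [] := by
        intro he
        subst he
        simp at hlt
        omega
      have hlt' : count < n + 1 + rest.length := by
        simp at hlt; omega
      have hk : (count - n).toNat = (count - (n + 1)).toNat + 1 := by omega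
      rw [pvAInner, if_neg hstop]
      simp only [hk, List.take_succ_cons, List.map_cons]
      rw [show (pvAInner count (n+1) rest).2.2 = ((pvAInner count (n+1) rest).2).2 from rfl]
      have h2 := ih (n + 1) hrest hlt'
      simp [h2]

lemma pvAOuter_eq (count : Int) : ∀ fuel l, count.toNat ≤ pvOff l + 26 ^ (l + 1) * fuel →
    pvAOuter count (pvOff l) (l + 1) fuel
      = (List.range (count.toNat - pvOff l)).map (fun j => String.mk (pvNameOf (pvOff l + 1 + j) [])) := by
  intro fuel
  induction fuel with
  | zero =>
    intro l h
    have : count.toNat - pvOff l = 0 := by omega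
    simp [pvAOuter, this]
  | succ fuel ih =>
    intro l h
    have hP : (0:Nat) < 26 ^ (l + 1) := Nat.pow_pos (by norm_num : (0:Nat) < 26)
    have hQ : 26 ^ (l + 1 + 1) = 26 * 26 ^ (l + 1) := by rw [pow_succ]; ring
    have hlen : ((pvAProd (l + 1)).length : Int) = (26 ^ (l + 1) : Nat) := by
      rw [pvAProd_length]
    by_cases hfull : (pvOff l : Int) + (26 ^ (l + 1) : Nat) ≤ count
    · -- the whole length-(l+1) block is yielded; the outer loop continues
      have hinner := pvAInner_full count (pvAProd (l + 1)) (pvOff l) (by rw [hlen]; exact hfull)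
      rw [pvAOuter, hinner]
      simp only [Bool.false_eq_true, if_false]
      have hnum : (pvOff l : Int) + ((pvAProd (l + 1)).length : Int) = (pvOff (l + 1) : Int) := by
        rw [hlen, pvOff_succ]; push_cast; ring
      have hnext : count.toNat ≤ pvOff (l + 1) + 26 ^ (l + 1 + 1) * fuel := by
        have h1 := pvOff_succ l
        have h2 : 26 ^ (l + 1) * (fuel + 1) = 26 ^ (l + 1) * fuel + 26 ^ (l + 1) := by ring
        have h3 : 26 ^ (l + 1) * fuel ≤ 26 ^ (l + 1 + 1) * fuel :=
          Nat.mul_le_mul_right _ (by rw [hQ]; omega)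
        omega
      have htail := ih (l + 1) hnext
      have hcnt : count.toNat - pvOff l = 26 ^ (l + 1) + (count.toNat - pvOff (l + 1)) := by
        have h1 := pvOff_succ l
        omega
      rw [hnum, htail, hcnt, List.range_add, List.map_append]
      congr 1
      · -- head block: the product strings are names pvOff l + 1 … pvOff l + 26^(l+1)
        rw [pvAProd_eq, List.map_map]
        apply List.map_congr_left
        intro j hj
        have hj' : j < 26 ^ (l + 1) := List.mem_range.mp hj
        simp [Function.comp, pvNameOf_off l j [] hj']
      · rw [List.map_map]
        apply List.map_congr_left
        intro j _
        have : pvOff (l + 1) + 1 + j = pvOff l + 1 + (26 ^ (l + 1) + j) := by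
          have h1 := pvOff_succ l
          omega
        simp [Function.comp, this]
    · -- the loop stops inside this block
      push_neg at hfull
      have hne : pvAProd (l + 1) ≠ [] := by
        intro he
        have := pvAProd_length (l + 1)
        rw [he] at this
        simp at this
        omega
      have hinner := pvAInner_stop count (pvAProd (l + 1)) (pvOff l) hne (by rw [hlen]; omega)
      rw [pvAOuter]
      have hstop : (pvAInner count (pvOff l) (pvAProd (l + 1))).2.2 = true := by
        rw [show (pvAInner count (pvOff l) (pvAProd (l+1))).2.2
            = ((pvAInner count (pvOff l) (pvAProd (l+1))).2).2 from rfl, hinner]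
      rw [if_pos hstop,
        show (pvAInner count (pvOff l) (pvAProd (l+1))).2.1
          = ((pvAInner count (pvOff l) (pvAProd (l+1))).2).1 from rfl, hinner]
      have hk : ((count : Int) - (pvOff l : Nat)).toNat = count.toNat - pvOff l := by omega
      have hkle : count.toNat - pvOff l ≤ 26 ^ (l + 1) := by omega
      rw [hk, pvAProd_eq, ← List.map_take, List.take_range, Nat.min_eq_left hkle, List.map_map]
      apply List.map_congr_left
      intro j hj
      have hj' : j < 26 ^ (l + 1) := by
        have := List.mem_range.mp hj
        omega
      simp [Function.comp, pvNameOf_off l j [] hj']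

lemma pvAltGo_eq (count : Int) : ∀ k n, ((count : Int) - (n : Nat)).toNat = k →
    pvAltGo count n = (List.range k).map (fun j => String.mk (pvNameOf (n + 1 + j) [])) := by
  intro k
  induction k with
  | zero =>
    intro n h
    have : ¬ ((n : Int) < count) := by omega
    rw [pvAltGo, dif_neg this]
    simp
  | succ k ih =>
    intro n h
    have hlt : (n : Int) < count := by omega
    rw [pvAltGo, dif_pos hlt, ih (n + 1) (by push_cast; omega)]
    rw [List.range_succ_eq_map, List.map_cons, List.map_map]
    congr 1
    apply List.map_congr_left
    intro j _
    have he : n + 1 + 1 + j = n + 1 + (j + 1) := by omega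
    simp [Function.comp, he]

-- ===== VERDICT (by name: the statement is the Claim_ definition above) =====
theorem generate_unique_lower_names_spec : Claim_equal_generate_unique_lower_names := by
  intro count _
  unfold Spec_generate_unique_lower_names generate_unique_lower_names generate_unique_lower_names_alt
  have hfuel : count.toNat ≤ pvOff 0 + 26 ^ (0 + 1) * (count.toNat + 1) := by
    have : (26:Nat) ^ (0 + 1) = 26 := by norm_num
    simp only [pvOff, this]
    omega
  have hA := pvAOuter_eq count (count.toNat + 1) 0 hfuel
  have hB := pvAltGo_eq count count.toNat 0 (by simp)
  simp only [pvOff] at hA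
  rw [show pvAOuter count 0 1 (count.toNat + 1) = pvAOuter count ((0:Nat):Int) (0+1) (count.toNat + 1) by norm_num] at *
  rw [hA, hB]
  simp
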